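-- pv_equiv track=rewrite | github.com/quang180898/doan-it | library/functions.py | search_object_list
-- ===== SOURCE A (Python) =====
-- def search_object_list(object_list, mapping_key, mapping_value_list):
--     try:
--         result = dict()
--         inserted_key = []
--         for obj in object_list:
--             if obj[mapping_key] not in inserted_key and obj[mapping_key] in mapping_value_list:
--                 result[obj[mapping_key]] = []
--                 inserted_key.append(obj[mapping_key])
--             if obj[mapping_key] in inserted_key:
--                 result[obj[mapping_key]].append(obj)
--
--         return result
--     except:
--         return dict()
-- ===== SOURCE B (Python) =====
-- def search_object_list(object_list, mapping_key, mapping_value_list):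
--     try:
--         objs = list(object_list)
--         keys = []
--         for obj in objs:
--             v = obj[mapping_key]
--             if v in mapping_value_list and v not in keys:
--                 keys.append(v)
--         return {v: [o for o in objs if o[mapping_key] == v] for v in keys}
--     except:
--         return dict()
-- ===== Notes on version B (the rewrite author's own statement) =====
-- stated objective: alternative
-- what changed: Instead of A's single pass that builds the grouping dict and an inserted-key list incrementally, B first computes the allowed key values in first-occurrence order in one pass and then builds the result with a dict comprehension that filters the object list once per key; the outer try/except returning {} on any error is kept.
import Mathlib
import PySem

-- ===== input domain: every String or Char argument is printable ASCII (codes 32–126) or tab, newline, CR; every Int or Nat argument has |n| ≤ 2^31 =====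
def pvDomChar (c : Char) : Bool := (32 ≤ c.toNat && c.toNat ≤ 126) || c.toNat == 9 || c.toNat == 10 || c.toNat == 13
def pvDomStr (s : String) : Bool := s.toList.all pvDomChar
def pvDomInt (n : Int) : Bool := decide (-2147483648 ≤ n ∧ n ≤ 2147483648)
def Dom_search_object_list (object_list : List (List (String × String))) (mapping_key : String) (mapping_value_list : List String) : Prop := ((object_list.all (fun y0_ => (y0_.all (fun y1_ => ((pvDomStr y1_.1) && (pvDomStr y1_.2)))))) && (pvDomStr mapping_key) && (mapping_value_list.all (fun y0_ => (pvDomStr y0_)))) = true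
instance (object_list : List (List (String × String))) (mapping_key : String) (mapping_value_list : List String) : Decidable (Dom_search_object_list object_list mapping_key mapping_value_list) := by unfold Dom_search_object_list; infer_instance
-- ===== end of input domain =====

-- B groups by iterating over the first-occurrence key order computed in one pass and then
-- filtering the object list once per key (alternative decomposition, same exact result).
-- ===== PORT A =====
-- A's loop; `none` = the bare `except:` fired (KeyError on obj[mapping_key] or result[...]),
-- in which case A returns the empty dict.
def aLoop (mapping_key : String) (mapping_value_list : List String) :
    List (List (String × String)) → PySem.Dict String (List (List (String × String))) → List String →
    Option (PySem.Dict String (List (List (String × String))) × List String)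
  | [], d, ik => some (d, ik)
  | o :: rest, d, ik =>
    match (PySem.Dict.mk o).get? mapping_key with
    | none => none
    | some v =>
      let st := if v ∉ ik ∧ v ∈ mapping_value_list then (d.insert v [], ik ++ [v]) else (d, ik)
      if v ∈ st.2 then
        match st.1.get? v with
        | none => none
        | some lst => aLoop mapping_key mapping_value_list rest (st.1.insert v (lst ++ [o])) st.2
      else aLoop mapping_key mapping_value_list rest st.1 st.2

def search_object_list (object_list : List (List (String × String))) (mapping_key : String) (mapping_value_list : List String) : List (String × List (List (String × String))) :=
  match aLoop mapping_key mapping_value_list object_list PySem.Dict.empty [] with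
  | some (d, _) => d.items
  | none => PySem.Dict.empty.items

-- ===== PORT B =====
-- first pass of B: the allowed key values in first-occurrence order; `none` = KeyError → except
def bKeys (mapping_key : String) (mapping_value_list : List String) :
    List (List (String × String)) → List String → Option (List String)
  | [], ks => some ks
  | o :: rest, ks =>
    match (PySem.Dict.mk o).get? mapping_key with
    | none => none
    | some v => bKeys mapping_key mapping_value_list rest
        (if v ∈ mapping_value_list ∧ v ∉ ks then ks ++ [v] else ks)

def search_object_list_alt (object_list : List (List (String × String))) (mapping_key : String) (mapping_value_list : List String) : List (String × List (List (String × String))) :=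
  match bKeys mapping_key mapping_value_list object_list [] with
  | none => []
  | some ks => ks.map (fun v => (v, object_list.filter (fun o => (PySem.Dict.mk o).get? mapping_key == some v)))

-- ===== PRECONDITION & SPEC =====
def Spec_search_object_list (object_list : List (List (String × String))) (mapping_key : String) (mapping_value_list : List String) (out : List (String × List (List (String × String)))) : Prop := out = search_object_list_alt object_list mapping_key mapping_value_list
instance (object_list : List (List (String × String))) (mapping_key : String) (mapping_value_list : List String) (out : List (String × List (List (String × String)))) : Decidable (Spec_search_object_list object_list mapping_key mapping_value_list out) := by unfold Spec_search_object_list; infer_instance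

-- ===== CLAIM (what is proved, stated in full; the proofs are below) =====
def Claim_equal_search_object_list : Prop := ∀ (object_list : List (List (String × String))) (mapping_key : String) (mapping_value_list : List String), Dom_search_object_list object_list mapping_key mapping_value_list → Spec_search_object_list object_list mapping_key mapping_value_list (search_object_list object_list mapping_key mapping_value_list)

-- ===== LEMMAS AND PROOFS =====

-- every key bKeys can emit is either an initial one or an allowed value
lemma bKeys_mem (mapping_key : String) (mvl : List String) :
    ∀ (objs : List (List (String × String))) (ik ks : List String),
      bKeys mapping_key mvl objs ik = some ks → ∀ w ∈ ks, w ∈ ik ∨ w ∈ mvl := by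
  intro objs
  induction objs with
  | nil => intro ik ks h; simp [bKeys] at h; subst h; exact fun w hw => Or.inl hw
  | cons o rest ih =>
    intro ik ks h w hw
    simp only [bKeys] at h
    cases hv : (PySem.Dict.mk o).get? mapping_key with
    | none => rw [hv] at h; exact absurd h (by simp)
    | some v =>
      rw [hv] at h
      rcases ih _ _ h w hw with h' | h'
      · by_cases hc : v ∈ mvl ∧ v ∉ ik
        · simp [hc] at h'
          rcases h' with h'' | h''
          · exact Or.inl h''
          · subst h''; exact Or.inr hc.1
        · simp [hc] at h'; exact Or.inl h'
      · exact Or.inr h'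

-- main invariant: A's loop from the abstract state (keys ik, groups g) equals B's two passes
lemma aLoop_eq (mapping_key : String) (mvl : List String) :
    ∀ (objs : List (List (String × String))) (ik : List String)
      (g : String → List (List (String × String))),
      ik.Nodup → (∀ w ∈ ik, w ∈ mvl) →
      aLoop mapping_key mvl objs (PySem.Dict.mk (ik.map (fun w => (w, g w)))) ik
        = (bKeys mapping_key mvl objs ik).map (fun ks =>
            (PySem.Dict.mk (ks.map (fun w =>
              (w, (if w ∈ ik then g w else []) ++
                   (objs.filter (fun o => (PySem.Dict.mk o).get? mapping_key == some w))))), ks)) := by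
  intro objs
  induction objs with
  | nil =>
    intro ik g hnd hmvl
    simp [aLoop, bKeys]
    exact fun a ha ha' => absurd ha ha'
  | cons o rest ih =>
    intro ik g hnd hmvl
    simp only [aLoop, bKeys]
    cases hv : (PySem.Dict.mk o).get? mapping_key with
    | none => simp
    | some v =>
      simp only []
      by_cases hc : v ∉ ik ∧ v ∈ mvl
      · -- new allowed key: insert v ↦ [], then immediately append o
        have hni : v ∉ ik := hc.1
        have hcon : (PySem.Dict.mk (ik.map (fun w => (w, g w)))).contains v = false := by
          rw [PySem.Dict.contains_eq_decide_mem_keys]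
          simp [PySem.Dict.keys_mk, Function.comp_def, hni]
        have hins : (PySem.Dict.mk (ik.map (fun w => (w, g w)))).insert v [] =
            PySem.Dict.mk ((ik ++ [v]).map (fun w => (w, if w = v then [] else g w))) := by
          apply PySem.Dict.ext
          rw [PySem.Dict.items_insert_of_not_contains _ _ hcon]
          simp only [List.map_append, List.map_cons, List.map_nil]
          congr 1
          exact (List.map_congr_left (fun w hw => by
            have : w ≠ v := by rintro rfl; exact hni hw
            simp [this])).symm
        have hnd' : (ik ++ [v]).Nodup := by
          rw [List.nodup_append]
          refine ⟨hnd, List.nodup_singleton v, ?_⟩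
          intro a ha b hb
          rw [List.mem_singleton] at hb
          subst hb
          exact fun h => hni (h ▸ ha)
        have hget : (PySem.Dict.mk ((ik ++ [v]).map (fun w => (w, if w = v then [] else g w)))).get? v
            = some [] := by
          apply PySem.Dict.get?_of_mem_items
          · simp
          · simpa [PySem.Dict.keys_mk, Function.comp_def] using hnd'
        have hcon2 : (PySem.Dict.mk ((ik ++ [v]).map (fun w => (w, if w = v then [] else g w)))).contains v = true := by
          rw [PySem.Dict.contains_eq_decide_mem_keys]; simp [PySem.Dict.keys_mk]
        have hins2 : (PySem.Dict.mk ((ik ++ [v]).map (fun w => (w, if w = v then [] else g w)))).insert v ([] ++ [o])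
            = PySem.Dict.mk ((ik ++ [v]).map (fun w => (w, if w = v then [o] else g w))) := by
          apply PySem.Dict.ext
          rw [PySem.Dict.items_insert_of_contains _ _ hcon2]
          simp only [List.map_map]
          exact List.map_congr_left (fun w hw => by
            by_cases h : w = v <;> simp [h])
        have hmvl' : ∀ w ∈ ik ++ [v], w ∈ mvl := by
          intro w hw; rcases List.mem_append.mp hw with h | h
          · exact hmvl w h
          · simp at h; subst h; exact hc.2
        simp only [if_pos hc, if_pos (by simp : v ∈ ik ++ [v]), hins, hget, hins2]
        rw [ih (ik ++ [v]) (fun w => if w = v then [o] else g w) hnd' hmvl']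
        have hbk : (if v ∈ mvl ∧ v ∉ ik then ik ++ [v] else ik) = ik ++ [v] := by
          simp [hc.1, hc.2]
        rw [hbk]
        cases hks : bKeys mapping_key mvl rest (ik ++ [v]) with
        | none => simp
        | some ks =>
          simp only [Option.map_some]
          congr 1
          congr 1
          congr 1
          apply List.map_congr_left
          intro w hw
          by_cases hwv : w = v
          · subst hwv
            simp [hni, hv]
          · have : ¬ ((PySem.Dict.mk o).get? mapping_key == some w) = true := by
              simp [hv]; exact fun h => hwv h.symm
            by_cases hwi : w ∈ ik <;>
              simp [hwv, hwi, this]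
      · -- not a new allowed key
        simp only [if_neg hc]
        by_cases hvi : v ∈ ik
        · -- existing key: append o to its group
          have hget : (PySem.Dict.mk (ik.map (fun w => (w, g w)))).get? v = some (g v) := by
            apply PySem.Dict.get?_of_mem_items
            · exact List.mem_map.mpr ⟨v, hvi, rfl⟩
            · simpa [PySem.Dict.keys_mk, Function.comp_def] using hnd
          have hcon2 : (PySem.Dict.mk (ik.map (fun w => (w, g w)))).contains v = true := by
            rw [PySem.Dict.contains_eq_decide_mem_keys]; simp [PySem.Dict.keys_mk, hvi]
          have hins2 : (PySem.Dict.mk (ik.map (fun w => (w, g w)))).insert v (g v ++ [o])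
              = PySem.Dict.mk (ik.map (fun w => (w, if w = v then g v ++ [o] else g w))) := by
            apply PySem.Dict.ext
            rw [PySem.Dict.items_insert_of_contains _ _ hcon2]
            simp only [List.map_map]
            exact List.map_congr_left (fun w hw => by
              by_cases h : w = v <;> simp [h])
          simp only [if_pos hvi, hget, hins2]
          rw [ih ik (fun w => if w = v then g v ++ [o] else g w) hnd hmvl]
          have hbk : (if v ∈ mvl ∧ v ∉ ik then ik ++ [v] else ik) = ik := by
            simp [hvi]
          rw [hbk]
          cases hks : bKeys mapping_key mvl rest ik with
          | none => simp
          | some ks =>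
            simp only [Option.map_some]
            congr 1
            congr 1
            congr 1
            apply List.map_congr_left
            intro w hw
            by_cases hwv : w = v
            · subst hwv
              simp [hvi, hv]
            · have : ¬ ((PySem.Dict.mk o).get? mapping_key == some w) = true := by
                simp [hv]; exact fun h => hwv h.symm
              by_cases hwi : w ∈ ik <;>
                simp [hwv, hwi, this]
        · -- disallowed key: skip entirely
          have hvm : v ∉ mvl := by
            by_contra h; exact hc ⟨hvi, h⟩
          simp only [if_neg hvi]
          rw [ih ik g hnd hmvl]
          have hbk' : (if v ∈ mvl ∧ v ∉ ik then ik ++ [v] else ik) = ik := by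
            simp [hvm]
          rw [hbk']
          cases hks : bKeys mapping_key mvl rest ik with
          | none => simp
          | some ks =>
            simp only [Option.map_some]
            congr 1
            congr 1
            congr 1
            apply List.map_congr_left
            intro w hw
            have hwv : w ≠ v := by
              rintro rfl
              rcases bKeys_mem mapping_key mvl rest ik ks hks w hw with h | h
              · exact hvi h
              · exact hvm h
            have : ¬ ((PySem.Dict.mk o).get? mapping_key == some w) = true := by
              simp [hv]; exact fun h => hwv h.symm
            by_cases hwi : w ∈ ik <;>
              simp [hwi, this]

-- ===== VERDICT (by name: the statement is the Claim_ definition above) =====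
theorem search_object_list_spec : Claim_equal_search_object_list := by
  intro object_list mapping_key mapping_value_list _
  unfold Spec_search_object_list search_object_list search_object_list_alt
  have h := aLoop_eq mapping_key mapping_value_list object_list [] (fun _ => [])
    List.nodup_nil (by simp)
  simp only [List.map_nil] at h
  rw [show PySem.Dict.mk ([] : List (String × List (List (String × String)))) = PySem.Dict.empty from rfl] at h
  rw [h]
  cases hks : bKeys mapping_key mapping_value_list object_list [] with
  | none => simp [PySem.Dict.empty]
  | some ks =>
    simp only [Option.map_some]
    simp
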